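-- pv_equiv track=rewrite | github.com/cleure/Doze | doze/doze.py | isSqlFunction
-- ===== SOURCE A (Python) =====
-- def isSqlFunction(param):
--     """
--     Check if supplied argument is a SQL function. All database specific
--     constants, which wrap to functions, may not be detected by this method.
--     Also, PostgreSQL's "SELECT 'NOW()'::timestamp" functionality does not work
--     in this implementation.
--
--     Currently detected constants are:
--         CURRENT_TIME
--         CURRENT_DATE
--         CURRENT_TIMESTAMP
--         LOCALTIMESTAMP
--         CURRENT_USER
--     """
--
--     # Constants, which are usually aliases for functions in most RDBMS
--     nonParenthesised = [
--         'CURRENT_TIME',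
--         'CURRENT_DATE',
--         'CURRENT_TIMESTAMP',
--         'LOCALTIMESTAMP',
--         'CURRENT_USER'
--     ]
--
--     # Check for constants / functions
--     if param.strip().upper() in nonParenthesised:
--         return True
--
--     # Preliminary check for parenthesis
--     if '(' not in param or ')' not in param:
--         return False
--
--     # These will be used to detect the open and close parentheses
--     openParen = False
--     closeParen = False
--
--     # State, for if we're currently in a quoted or double-quoted string
--     inQuote = False
--     inDoubleQuote = False
--
--     # Fairly basic algorithm. It detects the state of quotes, and uses
--     # that information to determine whether or not openParen / closeParen
--     # should be changed when parentheses are detected.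
--     for i in range(0, len(param)):
--         if param[i] == '\'':
--             if inDoubleQuote == False:
--                 if inQuote == True:
--                     inQuote = False
--                 else:
--                     inQuote = True
--
--         if param[i] == '"':
--             if inQuote == False:
--                 if inDoubleQuote == True:
--                     inDoubleQuote = False
--                 else:
--                     inDoubleQuote = True
--
--         if param[i] == '(' and not inDoubleQuote and not inQuote:
--             openParen = True
--
--         if param[i] == ')' and not inDoubleQuote and not inQuote:
--             if openParen == True:
--                 # Found both parentheses. Can safely break.
--                 closeParen = True
--                 break
--
--     return openParen and closeParen
-- ===== SOURCE B (Python) =====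
-- def _unquoted(s):
--     """Return s with every quoted region (including its delimiters) removed,
--     by jumping over quoted spans with str.find instead of tracking quote state."""
--     out = []
--     i = 0
--     n = len(s)
--     while i < n:
--         c = s[i]
--         if c == "'" or c == '"':
--             close = s.find(c, i + 1)
--             if close == -1:
--                 break
--             i = close + 1
--         else:
--             out.append(c)
--             i += 1
--     return ''.join(out)
--
--
-- def isSqlFunction(param):
--     nonParenthesised = {
--         'CURRENT_TIME',
--         'CURRENT_DATE',
--         'CURRENT_TIMESTAMP',
--         'LOCALTIMESTAMP',
--         'CURRENT_USER',
--     }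
--     if param.strip().upper() in nonParenthesised:
--         return True
--     u = _unquoted(param)
--     i = u.find('(')
--     return i != -1 and ')' in u[i + 1:]
-- ===== Notes on version B (the rewrite author's own statement) =====
-- stated objective: alternative
-- what changed: Instead of A's fused per-character scan with four interleaved booleans, B first strips quoted regions by jumping over each quoted span with str.find (no quote-state flags at all), then decides with a plain search on the stripped text for an open parenthesis followed by a close parenthesis.
import Mathlib
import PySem

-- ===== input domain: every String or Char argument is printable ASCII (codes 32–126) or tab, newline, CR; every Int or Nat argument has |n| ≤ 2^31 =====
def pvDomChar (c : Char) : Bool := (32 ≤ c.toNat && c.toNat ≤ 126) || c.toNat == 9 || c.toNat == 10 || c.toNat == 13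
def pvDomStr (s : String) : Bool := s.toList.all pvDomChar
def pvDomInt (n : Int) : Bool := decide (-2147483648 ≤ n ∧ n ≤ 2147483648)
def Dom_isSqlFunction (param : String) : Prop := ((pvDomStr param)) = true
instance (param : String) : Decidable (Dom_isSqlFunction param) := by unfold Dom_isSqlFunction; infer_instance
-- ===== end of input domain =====

-- B strips quoted regions by jumping over each quoted span (no quote-state flags),
-- then decides with a plain search on the stripped text; objective: alternative.

-- ===== PORT A =====
-- A's for-loop over param with state (openParen, inQuote, inDoubleQuote); the
-- returned pair is (openParen, closeParen); the 'break' is the early return.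
def pvLoopA : List Char → Bool → Bool → Bool → Bool × Bool
  | [], openP, _, _ => (openP, false)
  | c :: rest, openP, inQ, inDQ =>
    let inQ' := if c = '\'' && !inDQ then !inQ else inQ
    let inDQ' := if c = '"' && !inQ' then !inDQ else inDQ
    let openP' := if c = '(' && !inDQ' && !inQ' then true else openP
    if c = ')' && !inDQ' && !inQ' && openP' then (openP', true)
    else pvLoopA rest openP' inQ' inDQ'

def isSqlFunction (param : String) : Bool :=
  let nonParenthesised := ["CURRENT_TIME", "CURRENT_DATE", "CURRENT_TIMESTAMP",
                           "LOCALTIMESTAMP", "CURRENT_USER"]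
  if nonParenthesised.contains (PySem.Str.upper (PySem.Str.strip param)) then true
  else if !(PySem.Str.isIn "(" param) || !(PySem.Str.isIn ")" param) then false
  else
    let r := pvLoopA param.toList false false false
    r.1 && r.2

-- ===== PORT B =====
-- B's _unquoted while-loop: walks the string, and on a quote char jumps with
-- find past the matching close quote (break = return accumulated prefix on an
-- unterminated quote); ported as the structural recursion over the suffix.
def pvUnquoted : List Char → List Char
  | [] => []
  | c :: rest =>
    if c = '\'' || c = '"' then
      match PySem.List.index? rest c with
      | none => []
      | some j => pvUnquoted (rest.drop (j + 1))
    else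
      c :: pvUnquoted rest
termination_by l => l.length
decreasing_by
  · simp only [List.length_cons, List.length_drop]; omega
  · simp

def isSqlFunction_alt (param : String) : Bool :=
  let nonParenthesised : PySem.Set String :=
    PySem.Set.ofList ["CURRENT_TIME", "CURRENT_DATE", "CURRENT_TIMESTAMP",
                      "LOCALTIMESTAMP", "CURRENT_USER"]
  if PySem.Set.contains nonParenthesised (PySem.Str.upper (PySem.Str.strip param)) then true
  else
    let u := pvUnquoted param.toList
    match PySem.List.index? u '(' with
    | none => false
    | some i => (PySem.List.slice u (some ((i : Int) + 1)) none).contains ')'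

-- ===== PRECONDITION & SPEC =====
def Spec_isSqlFunction (param : String) (out : Bool) : Prop := out = isSqlFunction_alt param
instance (param : String) (out : Bool) : Decidable (Spec_isSqlFunction param out) := by unfold Spec_isSqlFunction; infer_instance

-- ===== CLAIM (what is proved, stated in full; the proofs are below) =====
def Claim_equal_isSqlFunction : Prop := ∀ (param : String), Dom_isSqlFunction param → Spec_isSqlFunction param (isSqlFunction param)

-- ===== LEMMAS AND PROOFS =====

-- the decision A's loop makes, expressed on the quote-stripped stream
def pvHasClose : List Char → Bool → Bool
  | [], _ => false
  | c :: r, op => if c = ')' && op then true else pvHasClose r (op || c = '(')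

theorem pvMem_unquoted {x : Char} {l : List Char} (h : x ∈ pvUnquoted l) : x ∈ l := by
  induction l using pvUnquoted.induct with
  | case1 => simp [pvUnquoted] at h
  | case2 c rest hq hidx =>
    rw [pvUnquoted, if_pos hq, hidx] at h
    simp at h
  | case3 c rest hq j hidx ih =>
    rw [pvUnquoted, if_pos hq, hidx] at h
    exact List.mem_cons_of_mem _ (List.mem_of_mem_drop (ih h))
  | case4 c rest hq ih =>
    rw [pvUnquoted, if_neg hq] at h
    rcases List.mem_cons.mp h with h | h
    · subst h; exact List.mem_cons_self
    · exact List.mem_cons_of_mem _ (ih h)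

-- A's loop inside a single-quoted region: everything is skipped until the next '\''
theorem pvLoopA_inQ (l : List Char) (op : Bool) :
    ((pvLoopA l op true false).1 && (pvLoopA l op true false).2)
      = (match PySem.List.index? l '\'' with
         | none => false
         | some j => ((pvLoopA (l.drop (j + 1)) op false false).1 &&
                      (pvLoopA (l.drop (j + 1)) op false false).2)) := by
  induction l with
  | nil => simp [pvLoopA, PySem.List.index?]
  | cons d rest ih =>
    by_cases h : d = '\''
    · subst h
      rw [PySem.List.index?_cons_self]
      simp [pvLoopA]
    · rw [PySem.List.index?_cons_of_ne rest h]
      have hstep : pvLoopA (d :: rest) op true false = pvLoopA rest op true false := by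
        simp [pvLoopA, h]
      rw [hstep, ih]
      cases hidx : PySem.List.index? rest '\'' with
      | none => simp
      | some j => simp [List.drop_succ_cons]

-- A's loop inside a double-quoted region: everything is skipped until the next '"'
theorem pvLoopA_inDQ (l : List Char) (op : Bool) :
    ((pvLoopA l op false true).1 && (pvLoopA l op false true).2)
      = (match PySem.List.index? l '"' with
         | none => false
         | some j => ((pvLoopA (l.drop (j + 1)) op false false).1 &&
                      (pvLoopA (l.drop (j + 1)) op false false).2)) := by
  induction l with
  | nil => simp [pvLoopA, PySem.List.index?]
  | cons d rest ih =>
    by_cases h : d = '"'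
    · subst h
      rw [PySem.List.index?_cons_self]
      simp [pvLoopA]
    · rw [PySem.List.index?_cons_of_ne rest h]
      have hstep : pvLoopA (d :: rest) op false true = pvLoopA rest op false true := by
        by_cases h1 : d = '\'' <;> simp [pvLoopA, h, h1]
      rw [hstep, ih]
      cases hidx : PySem.List.index? rest '"' with
      | none => simp
      | some j => simp [List.drop_succ_cons]

-- A's whole loop equals pvHasClose on the quote-stripped stream
theorem pvLoopA_eq (l : List Char) (op : Bool) :
    ((pvLoopA l op false false).1 && (pvLoopA l op false false).2)
      = pvHasClose (pvUnquoted l) op := by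
  induction l using pvUnquoted.induct generalizing op with
  | case1 => simp [pvLoopA, pvUnquoted, pvHasClose]
  | case2 c rest hq hidx =>
    rw [pvUnquoted, if_pos hq, hidx]
    rcases Bool.or_eq_true _ _ |>.mp hq with h | h
    · have h' : c = '\'' := by simpa using h
      subst h'
      have : pvLoopA ('\'' :: rest) op false false = pvLoopA rest op true false := by
        simp [pvLoopA]
      rw [this, pvLoopA_inQ, hidx]
      simp [pvHasClose]
    · have h' : c = '"' := by simpa using h
      subst h'
      have : pvLoopA ('"' :: rest) op false false = pvLoopA rest op false true := by
        simp [pvLoopA]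
      rw [this, pvLoopA_inDQ, hidx]
      simp [pvHasClose]
  | case3 c rest hq j hidx ih =>
    rw [pvUnquoted, if_pos hq, hidx]
    rcases Bool.or_eq_true _ _ |>.mp hq with h | h
    · have h' : c = '\'' := by simpa using h
      subst h'
      have : pvLoopA ('\'' :: rest) op false false = pvLoopA rest op true false := by
        simp [pvLoopA]
      rw [this, pvLoopA_inQ, hidx]
      simpa using ih op
    · have h' : c = '"' := by simpa using h
      subst h'
      have : pvLoopA ('"' :: rest) op false false = pvLoopA rest op false true := by
        simp [pvLoopA]
      rw [this, pvLoopA_inDQ, hidx]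
      simpa using ih op
  | case4 c rest hq ih =>
    rw [pvUnquoted, if_neg hq]
    have hq1 : ¬ c = '\'' := by intro h; exact hq (by simp [h])
    have hq2 : ¬ c = '"' := by intro h; exact hq (by simp [h])
    by_cases h3 : c = '('
    · subst h3
      have : pvLoopA ('(' :: rest) op false false = pvLoopA rest true false false := by
        simp [pvLoopA]
      rw [this, ih]
      simp [pvHasClose]
    · by_cases h4 : c = ')'
      · subst h4
        cases op
        · have : pvLoopA (')' :: rest) false false false = pvLoopA rest false false false := by
            simp [pvLoopA]
          rw [this, ih]
          simp [pvHasClose]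
        · simp [pvLoopA, pvHasClose]
      · have : pvLoopA (c :: rest) op false false = pvLoopA rest op false false := by
          simp [pvLoopA, hq1, hq2, h3, h4]
        rw [this, ih]
        simp [pvHasClose, h3, h4]

theorem pvHasClose_true (ps : List Char) : pvHasClose ps true = ps.contains ')' := by
  induction ps with
  | nil => simp [pvHasClose]
  | cons c r ih => by_cases h : c = ')' <;> simp [pvHasClose, h, ih, eq_comm]

theorem pvHasClose_eq_search (ps : List Char) :
    pvHasClose ps false
      = (match PySem.List.index? ps '(' with
         | none => false
         | some i => (PySem.List.slice ps (some ((i : Int) + 1)) none).contains ')') := by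
  induction ps with
  | nil => simp [pvHasClose, PySem.List.index?]
  | cons c r ih =>
    by_cases h : c = '('
    · subst h
      rw [PySem.List.index?_cons_self]
      simp only [Nat.cast_zero, zero_add]
      rw [PySem.List.slice_from _ (by norm_num)]
      simp [pvHasClose, pvHasClose_true]
    · have hne : c ≠ '(' := h
      rw [PySem.List.index?_cons_of_ne r hne]
      have hstep : pvHasClose (c :: r) false = pvHasClose r false := by
        simp [pvHasClose, h]
      rw [hstep, ih]
      cases hidx : PySem.List.index? r '(' with
      | none => simp
      | some i =>
        simp only [Option.map_some]
        have e1 : ((i : Int) + 1) = (((i + 1 : Nat)) : Int) := by push_cast; ring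
        have e2 : (((i + 1 : Nat) : Int) + 1) = (((i + 2 : Nat)) : Int) := by push_cast; ring
        rw [e1, e2, PySem.List.slice_from_natCast, PySem.List.slice_from_natCast]
        simp [List.drop_succ_cons]

theorem pvSingleton_infix_iff (a : Char) (l : List Char) : [a] <:+: l ↔ a ∈ l := by
  constructor
  · rintro ⟨s, t, rfl⟩
    simp
  · intro hm
    rcases List.append_of_mem hm with ⟨s, t, rfl⟩
    exact ⟨s, t, by simp⟩

-- ===== VERDICT (by name: the statement is the Claim_ definition above) =====
theorem isSqlFunction_spec : Claim_equal_isSqlFunction := by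
  intro param _
  unfold Spec_isSqlFunction isSqlFunction isSqlFunction_alt
  have hset : (PySem.Set.ofList ["CURRENT_TIME", "CURRENT_DATE", "CURRENT_TIMESTAMP",
      "LOCALTIMESTAMP", "CURRENT_USER"] : PySem.Set String)
      = ["CURRENT_TIME", "CURRENT_DATE", "CURRENT_TIMESTAMP",
         "LOCALTIMESTAMP", "CURRENT_USER"] := by rfl
  simp only [hset, PySem.Set.contains_eq_listContains]
  by_cases hc : (["CURRENT_TIME", "CURRENT_DATE", "CURRENT_TIMESTAMP",
      "LOCALTIMESTAMP", "CURRENT_USER"].contains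
        (PySem.Str.upper (PySem.Str.strip param))) = true
  · rw [if_pos hc, if_pos hc]
  · rw [if_neg hc, if_neg hc]
    have hpo : (PySem.Chars.isIn ['('] param.toList = true) ↔ '(' ∈ param.toList := by
      rw [PySem.Chars.isIn_iff_infix]; exact pvSingleton_infix_iff '(' param.toList
    have hpc : (PySem.Chars.isIn [')'] param.toList = true) ↔ ')' ∈ param.toList := by
      rw [PySem.Chars.isIn_iff_infix]; exact pvSingleton_infix_iff ')' param.toList
    by_cases hin1 : '(' ∈ param.toList
    · by_cases hin2 : ')' ∈ param.toList
      · have hcond : (!(PySem.Str.isIn "(" param) || !(PySem.Str.isIn ")" param)) = false := by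
          simp [hpo.mpr hin1, hpc.mpr hin2]
        rw [if_neg (by rw [hcond]; simp)]
        rw [pvLoopA_eq param.toList false]
        exact pvHasClose_eq_search _
      · -- ')' absent from param: A's preliminary check fires; B's stripped text has no ')'
        have hcond : (!(PySem.Str.isIn "(" param) || !(PySem.Str.isIn ")" param)) = true := by
          simp only [Bool.or_eq_true, Bool.not_eq_true']
          refine Or.inr ?_
          simp only [PySem.Str.isIn_eq]
          rw [Bool.eq_false_iff]
          intro hx; exact hin2 (hpc.mp hx)
        rw [if_pos hcond]
        cases hidx : PySem.List.index? (pvUnquoted param.toList) '(' with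
        | none => simp
        | some i =>
          symm
          rw [Bool.eq_false_iff]
          intro hcontains
          have hm : ')' ∈ PySem.List.slice (pvUnquoted param.toList) (some ((i : Int) + 1)) none := by
            simpa using hcontains
          exact hin2 (pvMem_unquoted (PySem.List.mem_of_mem_slice _ _ _ hm))
    · -- '(' absent from param: A's preliminary check fires; B finds no '(' either
      have hcond : (!(PySem.Str.isIn "(" param) || !(PySem.Str.isIn ")" param)) = true := by
        simp only [Bool.or_eq_true, Bool.not_eq_true']
        refine Or.inl ?_
        simp only [PySem.Str.isIn_eq]
        rw [Bool.eq_false_iff]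
        intro hx; exact hin1 (hpo.mp hx)
      rw [if_pos hcond]
      have hnone : PySem.List.index? (pvUnquoted param.toList) '(' = none := by
        rw [PySem.List.index?_eq_none_iff]
        intro hm; exact hin1 (pvMem_unquoted hm)
      rw [hnone]
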